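-- pv_equiv track=rewrite | github.com/PostHog/posthog | posthog/management/commands/generate_source_configs.py | _sort_fields_by_defaults
-- ===== SOURCE A (Python) =====
-- def _sort_fields_by_defaults(fields: list[str]) -> list[str]:
--     """Sort fields so that fields without defaults come before fields with defaults."""
--
--     fields_without_defaults = []
--     fields_with_config_annotations = []
--     fields_with_none_default = []
--     fields_with_defaults = []
--
--     for field in fields:
--         field_content = field.strip()
--         if field_content == "pass" or not field_content:
--             continue
--
--         # If the field contains " = " it has a default, otherwise it doesn't
--         if "config." in field_content and "default=" not in field_content:
--             fields_with_config_annotations.append(field)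
--         elif " = " in field_content and "default_factory=lambda: None" in field_content:
--             fields_with_none_default.append(field)
--         elif " = " in field_content:
--             fields_with_defaults.append(field)
--         else:
--             fields_without_defaults.append(field)
--
--     return (
--         fields_without_defaults + fields_with_config_annotations + fields_with_none_default + fields_with_defaults
--     )
-- ===== SOURCE B (Python) =====
-- def _priority(field: str) -> int:
--     content = field.strip()
--     if "config." in content and "default=" not in content:
--         return 1
--     if " = " in content:
--         return 2 if "default_factory=lambda: None" in content else 3
--     return 0
--
--
-- def _sort_fields_by_defaults(fields: list[str]) -> list[str]:
--     """Sort fields so that fields without defaults come before fields with defaults."""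
--     kept = [f for f in fields if f.strip() and f.strip() != "pass"]
--     return sorted(kept, key=_priority)
-- ===== Notes on version B (the rewrite author's own statement) =====
-- stated objective: idiomatic
-- what changed: Replaces the four explicit bucket lists and their concatenation by a filter plus a stable sorted(key=priority), where priority maps each field to its bucket rank 0-3.
import Mathlib
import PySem

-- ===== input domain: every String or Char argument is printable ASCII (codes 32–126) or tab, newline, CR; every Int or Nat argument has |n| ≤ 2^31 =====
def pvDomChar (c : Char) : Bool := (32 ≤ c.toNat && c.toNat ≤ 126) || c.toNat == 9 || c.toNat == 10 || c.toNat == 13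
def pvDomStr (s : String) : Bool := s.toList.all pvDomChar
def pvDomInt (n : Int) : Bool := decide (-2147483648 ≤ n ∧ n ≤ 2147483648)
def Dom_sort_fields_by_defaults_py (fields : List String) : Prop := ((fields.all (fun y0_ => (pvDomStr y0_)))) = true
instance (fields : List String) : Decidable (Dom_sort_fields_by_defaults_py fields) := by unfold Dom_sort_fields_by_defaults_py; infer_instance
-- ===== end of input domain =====

-- ===== PORT A =====
-- B replaces A's four explicit bucket lists by a filter + stable sort by a priority key (idiomatic; same result proved).
def sort_fields_by_defaults_py (fields : List String) : List String :=
  let s := fields.foldl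
    (fun (acc : List String × List String × List String × List String) field =>
      let field_content := PySem.Str.strip field
      if field_content == "pass" || field_content == "" then acc
      else if PySem.Str.isIn "config." field_content && !(PySem.Str.isIn "default=" field_content) then
        (acc.1, acc.2.1 ++ [field], acc.2.2.1, acc.2.2.2)
      else if PySem.Str.isIn " = " field_content && PySem.Str.isIn "default_factory=lambda: None" field_content then
        (acc.1, acc.2.1, acc.2.2.1 ++ [field], acc.2.2.2)
      else if PySem.Str.isIn " = " field_content then
        (acc.1, acc.2.1, acc.2.2.1, acc.2.2.2 ++ [field])
      else
        (acc.1 ++ [field], acc.2.1, acc.2.2.1, acc.2.2.2))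
    ([], [], [], [])
  s.1 ++ s.2.1 ++ s.2.2.1 ++ s.2.2.2

-- ===== PORT B =====
def pvPriority (field : String) : Int :=
  if PySem.Str.isIn "config." (PySem.Str.strip field) && !(PySem.Str.isIn "default=" (PySem.Str.strip field)) then 1
  else if PySem.Str.isIn " = " (PySem.Str.strip field) then
    (if PySem.Str.isIn "default_factory=lambda: None" (PySem.Str.strip field) then 2 else 3)
  else 0

def sort_fields_by_defaults_py_alt (fields : List String) : List String :=
  let kept := fields.filter
    (fun f => !(PySem.Str.strip f == "") && !(PySem.Str.strip f == "pass"))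
  PySem.List.sorted kept pvPriority

-- ===== PRECONDITION & SPEC =====
def Spec_sort_fields_by_defaults_py (fields : List String) (out : List String) : Prop := out = sort_fields_by_defaults_py_alt fields
instance (fields : List String) (out : List String) : Decidable (Spec_sort_fields_by_defaults_py fields out) := by unfold Spec_sort_fields_by_defaults_py; infer_instance

-- ===== CLAIM (what is proved, stated in full; the proofs are below) =====
def Claim_equal_sort_fields_by_defaults_py : Prop := ∀ (fields : List String), Dom_sort_fields_by_defaults_py fields → Spec_sort_fields_by_defaults_py fields (sort_fields_by_defaults_py fields)

-- ===== LEMMAS AND PROOFS =====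

-- the i-th priority bucket of the kept fields, in input order
def pvBucket (i : Int) (xs : List String) : List String :=
  xs.filter (fun f => pvPriority f == i)

theorem mem_pvBucket {i : Int} {y : String} {xs : List String}
    (h : y ∈ pvBucket i xs) : pvPriority y = i := by
  simpa using (List.of_mem_filter h)

theorem pvPriority_cases (f : String) :
    pvPriority f = 0 ∨ pvPriority f = 1 ∨ pvPriority f = 2 ∨ pvPriority f = 3 := by
  unfold pvPriority; split_ifs <;> simp

-- insertBy passes over a block it does not insert before
theorem insertBy_append_false {α : Type} (before : α → α → Bool) (x : α)
    (ys zs : List α) (h : ∀ y ∈ ys, before x y = false) :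
    PySem.List.insertBy before x (ys ++ zs) = ys ++ PySem.List.insertBy before x zs := by
  induction ys with
  | nil => simp
  | cons y ys ih =>
      simp only [List.cons_append, PySem.List.insertBy, h y (by simp),
        ih (fun a ha => h a (by simp [ha]))]
      simp

-- insertBy places x at the end of a block it never sorts before
theorem insertBy_all_false {α : Type} (before : α → α → Bool) (x : α)
    (zs : List α) (h : ∀ y ∈ zs, before x y = false) :
    PySem.List.insertBy before x zs = zs ++ [x] := by
  simpa using insertBy_append_false before x zs [] h

-- insertBy places x at the front of a block it sorts before entirely
theorem insertBy_all_true {α : Type} (before : α → α → Bool) (x : α)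
    (zs : List α) (h : ∀ y ∈ zs, before x y = true) :
    PySem.List.insertBy before x zs = x :: zs := by
  cases zs with
  | nil => rfl
  | cons z zs => simp [PySem.List.insertBy, h z (by simp)]

-- stable sort by pvPriority is the concatenation of the four priority buckets
theorem sorted_priority_buckets (xs : List String) :
    PySem.List.sorted xs pvPriority =
      pvBucket 0 xs ++ pvBucket 1 xs ++ pvBucket 2 xs ++ pvBucket 3 xs := by
  induction xs using List.reverseRecOn with
  | nil => rfl
  | append_singleton xs x ih =>
      rw [PySem.List.sorted_eq_foldl_insertBy] at ih ⊢
      rw [List.foldl_append, List.foldl_cons, List.foldl_nil, ih]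
      have hB : ∀ i : Int, pvBucket i (xs ++ [x]) =
          pvBucket i xs ++ (if pvPriority x == i then [x] else []) := by
        intro i; simp [pvBucket, List.filter_append, List.filter_cons]
      rcases pvPriority_cases x with h | h | h | h <;>
        simp only [hB, h, List.append_assoc]
      · rw [insertBy_append_false _ _ (pvBucket 0 xs) _
              (fun y hy => by simp [h, mem_pvBucket hy]),
            insertBy_all_true _ _ _
              (by intro y hy
                  simp only [List.mem_append] at hy
                  rcases hy with hy | hy | hy <;> simp [h, mem_pvBucket hy])]
        simp
      · rw [insertBy_append_false _ _ (pvBucket 0 xs) _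
              (fun y hy => by simp [h, mem_pvBucket hy]),
            insertBy_append_false _ _ (pvBucket 1 xs) _
              (fun y hy => by simp [h, mem_pvBucket hy]),
            insertBy_all_true _ _ _
              (by intro y hy
                  simp only [List.mem_append] at hy
                  rcases hy with hy | hy <;> simp [h, mem_pvBucket hy])]
        simp
      · rw [insertBy_append_false _ _ (pvBucket 0 xs) _
              (fun y hy => by simp [h, mem_pvBucket hy]),
            insertBy_append_false _ _ (pvBucket 1 xs) _
              (fun y hy => by simp [h, mem_pvBucket hy]),
            insertBy_append_false _ _ (pvBucket 2 xs) _
              (fun y hy => by simp [h, mem_pvBucket hy]),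
            insertBy_all_true _ _ _
              (fun y hy => by simp [h, mem_pvBucket hy])]
        simp
      · rw [insertBy_append_false _ _ (pvBucket 0 xs) _
              (fun y hy => by simp [h, mem_pvBucket hy]),
            insertBy_append_false _ _ (pvBucket 1 xs) _
              (fun y hy => by simp [h, mem_pvBucket hy]),
            insertBy_append_false _ _ (pvBucket 2 xs) _
              (fun y hy => by simp [h, mem_pvBucket hy]),
            insertBy_all_false _ _ _
              (fun y hy => by simp [h, mem_pvBucket hy])]
        simp

-- the branch conditions of A determine pvPriority
theorem prio_one {f : String}
    (h : (PySem.Str.isIn "config." (PySem.Str.strip f) && !(PySem.Str.isIn "default=" (PySem.Str.strip f))) = true) :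
    pvPriority f = 1 := by
  unfold pvPriority; rw [if_pos h]

theorem prio_two {f : String}
    (h1 : ¬ (PySem.Str.isIn "config." (PySem.Str.strip f) && !(PySem.Str.isIn "default=" (PySem.Str.strip f))) = true)
    (h2 : (PySem.Str.isIn " = " (PySem.Str.strip f) && PySem.Str.isIn "default_factory=lambda: None" (PySem.Str.strip f)) = true) :
    pvPriority f = 2 := by
  simp only [Bool.and_eq_true] at h2
  unfold pvPriority; rw [if_neg h1, if_pos h2.1, if_pos h2.2]

theorem prio_three {f : String}
    (h1 : ¬ (PySem.Str.isIn "config." (PySem.Str.strip f) && !(PySem.Str.isIn "default=" (PySem.Str.strip f))) = true)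
    (h2 : ¬ (PySem.Str.isIn " = " (PySem.Str.strip f) && PySem.Str.isIn "default_factory=lambda: None" (PySem.Str.strip f)) = true)
    (h3 : PySem.Str.isIn " = " (PySem.Str.strip f) = true) :
    pvPriority f = 3 := by
  have hl : PySem.Str.isIn "default_factory=lambda: None" (PySem.Str.strip f) = false := by
    rcases Bool.eq_false_or_eq_true (PySem.Str.isIn "default_factory=lambda: None" (PySem.Str.strip f)) with h | h
    · exact absurd (show _ = true by rw [h3, h]; rfl) h2
    · exact h
  unfold pvPriority; rw [if_neg h1, if_pos h3, if_neg (by rw [hl]; simp)]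

theorem prio_zero {f : String}
    (h1 : ¬ (PySem.Str.isIn "config." (PySem.Str.strip f) && !(PySem.Str.isIn "default=" (PySem.Str.strip f))) = true)
    (h3 : ¬ PySem.Str.isIn " = " (PySem.Str.strip f) = true) :
    pvPriority f = 0 := by
  unfold pvPriority; rw [if_neg h1, if_neg h3]

-- A's loop, with its four accumulators made explicit as the buckets of the kept fields
theorem loopA_eq (fields : List String) (w c n d : List String) :
    fields.foldl
      (fun (acc : List String × List String × List String × List String) field =>
        let field_content := PySem.Str.strip field
        if field_content == "pass" || field_content == "" then acc
        else if PySem.Str.isIn "config." field_content && !(PySem.Str.isIn "default=" field_content) then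
          (acc.1, acc.2.1 ++ [field], acc.2.2.1, acc.2.2.2)
        else if PySem.Str.isIn " = " field_content && PySem.Str.isIn "default_factory=lambda: None" field_content then
          (acc.1, acc.2.1, acc.2.2.1 ++ [field], acc.2.2.2)
        else if PySem.Str.isIn " = " field_content then
          (acc.1, acc.2.1, acc.2.2.1, acc.2.2.2 ++ [field])
        else
          (acc.1 ++ [field], acc.2.1, acc.2.2.1, acc.2.2.2))
      (w, c, n, d)
    = (w ++ pvBucket 0 (fields.filter (fun f => !(PySem.Str.strip f == "") && !(PySem.Str.strip f == "pass"))),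
       c ++ pvBucket 1 (fields.filter (fun f => !(PySem.Str.strip f == "") && !(PySem.Str.strip f == "pass"))),
       n ++ pvBucket 2 (fields.filter (fun f => !(PySem.Str.strip f == "") && !(PySem.Str.strip f == "pass"))),
       d ++ pvBucket 3 (fields.filter (fun f => !(PySem.Str.strip f == "") && !(PySem.Str.strip f == "pass")))) := by
  induction fields generalizing w c n d with
  | nil => simp [pvBucket]
  | cons f fs ih =>
      simp only [List.foldl_cons, List.filter_cons]
      by_cases hp : (PySem.Str.strip f == "pass" || PySem.Str.strip f == "") = true
      · have hk : (!(PySem.Str.strip f == "") && !(PySem.Str.strip f == "pass")) = false := by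
          rcases Bool.or_eq_true_iff.mp hp with h | h <;> simp [h]
        simp only [hp, if_true, hk, Bool.false_eq_true, if_false, ih]
      · have hk : (!(PySem.Str.strip f == "") && !(PySem.Str.strip f == "pass")) = true := by
          simp only [Bool.or_eq_true_iff] at hp
          push_neg at hp
          simp only [Bool.and_eq_true, Bool.not_eq_true']
          exact ⟨by simpa using hp.2, by simpa using hp.1⟩
        rw [if_neg hp, if_pos hk]
        by_cases h1 : (PySem.Str.isIn "config." (PySem.Str.strip f) && !(PySem.Str.isIn "default=" (PySem.Str.strip f))) = true
        · rw [if_pos h1, ih]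
          simp [pvBucket, List.filter_cons, prio_one h1]
        · rw [if_neg h1]
          by_cases h2 : (PySem.Str.isIn " = " (PySem.Str.strip f) && PySem.Str.isIn "default_factory=lambda: None" (PySem.Str.strip f)) = true
          · rw [if_pos h2, ih]
            simp [pvBucket, List.filter_cons, prio_two h1 h2]
          · rw [if_neg h2]
            by_cases h3 : PySem.Str.isIn " = " (PySem.Str.strip f) = true
            · rw [if_pos h3, ih]
              simp [pvBucket, List.filter_cons, prio_three h1 h2 h3]
            · rw [if_neg h3, ih]
              simp [pvBucket, List.filter_cons, prio_zero h1 h3]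

-- ===== VERDICT (by name: the statement is the Claim_ definition above) =====
theorem sort_fields_by_defaults_py_spec : Claim_equal_sort_fields_by_defaults_py := by
  intro fields _
  unfold Spec_sort_fields_by_defaults_py sort_fields_by_defaults_py sort_fields_by_defaults_py_alt
  rw [loopA_eq, sorted_priority_buckets]
  simp
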